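-- pv_equiv track=rewrite | github.com/gabrieleadomaityte/JupyterNotebooks | DATAZIP/uzduotis_1.py | rasti_pasikartojancias_raides
-- ===== SOURCE A (Python) =====
-- def rasti_pasikartojancias_raides(zodziai):
--     pasikartojantys = []
--     for zodis in zodziai:
--         for raide in zodis:
--             if zodis.count(raide) >1:
--                 pasikartojantys.append(zodis)
--                 break
--     return pasikartojantys
-- ===== SOURCE B (Python) =====
-- def rasti_pasikartojancias_raides(zodziai):
--     return [zodis for zodis in zodziai if len(set(zodis)) != len(zodis)]
-- ===== Notes on version B (the rewrite author's own statement) =====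
-- stated objective: idiomatic
-- what changed: Replaces A's inner per-character count-and-break scan with a single set construction per word: a word is kept iff deduplicating its characters shrinks its length.
import Mathlib
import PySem

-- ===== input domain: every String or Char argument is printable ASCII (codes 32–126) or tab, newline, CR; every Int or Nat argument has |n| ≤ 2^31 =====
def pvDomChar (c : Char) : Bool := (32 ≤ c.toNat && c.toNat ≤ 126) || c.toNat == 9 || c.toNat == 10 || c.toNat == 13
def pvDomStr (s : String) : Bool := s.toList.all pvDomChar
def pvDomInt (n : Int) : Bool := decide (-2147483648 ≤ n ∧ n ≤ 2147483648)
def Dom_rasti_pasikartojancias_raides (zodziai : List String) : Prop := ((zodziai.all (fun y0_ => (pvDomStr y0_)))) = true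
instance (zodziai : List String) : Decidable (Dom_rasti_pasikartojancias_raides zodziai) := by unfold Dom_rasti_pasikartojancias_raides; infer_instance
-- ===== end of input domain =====

-- B replaces A's inner count-and-break scan by one set construction per word (idiomatic; same outer order).

-- ===== PORT A =====
-- inner loop of A: scan the word's characters; on the first character occurring
-- more than once in the word, append (break) — returns whether the append fired.
-- zodis.count(raide) for a 1-character raide is exactly the character count.
def pvInnerA (full : List Char) : List Char → Bool
  | [] => false
  | c :: rest => if 1 < List.count c full then true else pvInnerA full rest

def rasti_pasikartojancias_raides (zodziai : List String) : List String :=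
  zodziai.foldl (fun pasikartojantys zodis =>
    if pvInnerA zodis.toList zodis.toList then pasikartojantys ++ [zodis] else pasikartojantys) []

-- ===== PORT B =====
def rasti_pasikartojancias_raides_alt (zodziai : List String) : List String :=
  zodziai.filter (fun zodis => PySem.Set.len (PySem.Set.ofList zodis.toList) != PySem.Str.len zodis)

-- ===== PRECONDITION & SPEC =====
def Spec_rasti_pasikartojancias_raides (zodziai : List String) (out : List String) : Prop := out = rasti_pasikartojancias_raides_alt zodziai
instance (zodziai : List String) (out : List String) : Decidable (Spec_rasti_pasikartojancias_raides zodziai out) := by unfold Spec_rasti_pasikartojancias_raides; infer_instance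

-- ===== CLAIM (what is proved, stated in full; the proofs are below) =====
def Claim_equal_rasti_pasikartojancias_raides : Prop := ∀ (zodziai : List String), Dom_rasti_pasikartojancias_raides zodziai → Spec_rasti_pasikartojancias_raides zodziai (rasti_pasikartojancias_raides zodziai)

-- ===== LEMMAS AND PROOFS =====
theorem pvInnerA_iff (full chars : List Char) :
    pvInnerA full chars = true ↔ ∃ c ∈ chars, 1 < List.count c full := by
  induction chars with
  | nil => simp [pvInnerA]
  | cons c rest ih =>
    simp only [pvInnerA]
    split <;> simp_all

theorem pvOfList_len_eq_iff (l : List Char) :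
    (PySem.Set.ofList l).length = l.length ↔ l.Nodup := by
  constructor
  · intro h
    have hperm : (PySem.Set.ofList l).Perm l.dedup := by
      rw [List.perm_ext_iff_of_nodup (PySem.Set.nodup_ofList l) l.nodup_dedup]
      intro a; simp [PySem.Set.mem_ofList, List.mem_dedup]
    have hlen : l.dedup.length = l.length := by
      rw [← hperm.length_eq, h]
    have : l.dedup = l := (List.dedup_sublist l).eq_of_length hlen
    rw [← this]; exact l.nodup_dedup
  · intro h
    rw [PySem.Set.ofList_eq_self_of_nodup l h]

theorem pvPred_eq (zodis : String) :
    pvInnerA zodis.toList zodis.toList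
      = (PySem.Set.len (PySem.Set.ofList zodis.toList) != PySem.Str.len zodis) := by
  set l := zodis.toList with hl
  by_cases h : l.Nodup
  · have h1 : pvInnerA l l = false := by
      rw [Bool.eq_false_iff, Ne, pvInnerA_iff]
      rintro ⟨c, _, hc⟩
      exact absurd hc (by simpa using (List.nodup_iff_count_le_one.mp h c))
    have h2 : (PySem.Set.ofList l).length = l.length := (pvOfList_len_eq_iff l).mpr h
    simp [h1, PySem.Set.len, h2]
    rw [hl]
    exact String.length_toList (s := zodis)
  · have h1 : pvInnerA l l = true := by
      rw [pvInnerA_iff]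
      rw [List.nodup_iff_count_le_one] at h
      push Not at h
      obtain ⟨c, hc⟩ := h
      exact ⟨c, List.count_pos_iff.mp (by omega), hc⟩
    have h2 : (PySem.Set.ofList l).length ≠ l.length := fun he => h ((pvOfList_len_eq_iff l).mp he)
    simp [h1, PySem.Set.len]
    intro he
    exact h2 (by rw [he, hl]; exact (String.length_toList (s := zodis)).symm)

-- ===== VERDICT (by name: the statement is the Claim_ definition above) =====
theorem rasti_pasikartojancias_raides_spec : Claim_equal_rasti_pasikartojancias_raides := by
  intro zodziai _
  unfold Spec_rasti_pasikartojancias_raides rasti_pasikartojancias_raides rasti_pasikartojancias_raides_alt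
  have := PySem.List.foldl_append_if
    (fun zodis => pvInnerA zodis.toList zodis.toList) (fun z => z) zodziai []
  simp only [List.map_id_fun', id] at this
  rw [this, List.nil_append]
  exact List.filter_congr (fun z _ => pvPred_eq z)
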